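-- pv_equiv track=rewrite | github.com/aaronspindler/aaronspindler.com | feefifofunds/services/data_sources/yahoo_finance.py | _map_category_to_asset_class
-- ===== SOURCE A (Python) =====
-- def _map_category_to_asset_class(category: str) -> str:
--     """
--     Map Yahoo Finance category to our asset class.
--
--     Args:
--         category: Yahoo Finance category string
--
--     Returns:
--         Asset class code (EQUITY, BOND, MIXED, etc.)
--     """
--     category_lower = category.lower()
--
--     if any(word in category_lower for word in ["equity", "stock", "growth", "value", "blend"]):
--         return "EQUITY"
--     elif any(word in category_lower for word in ["bond", "fixed income", "income"]):
--         return "BOND"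
--     elif any(word in category_lower for word in ["balanced", "allocation", "mixed"]):
--         return "MIXED"
--     elif "money market" in category_lower:
--         return "MM"
--     elif any(word in category_lower for word in ["commodity", "gold", "silver"]):
--         return "COMMODITY"
--     elif any(word in category_lower for word in ["real estate", "reit"]):
--         return "REIT"
--     else:
--         return "EQUITY"  # Default to equity
-- ===== SOURCE B (Python) =====
-- _KEYWORD_CODE = {
--     "equity": "EQUITY", "stock": "EQUITY", "growth": "EQUITY",
--     "value": "EQUITY", "blend": "EQUITY",
--     "bond": "BOND", "fixed income": "BOND", "income": "BOND",
--     "balanced": "MIXED", "allocation": "MIXED", "mixed": "MIXED",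
--     "money market": "MM",
--     "commodity": "COMMODITY", "gold": "COMMODITY", "silver": "COMMODITY",
--     "real estate": "REIT", "reit": "REIT",
-- }
--
-- _PRIORITY = ["EQUITY", "BOND", "MIXED", "MM", "COMMODITY", "REIT"]
--
--
-- def _map_category_to_asset_class(category: str) -> str:
--     category_lower = category.lower()
--     matched = {code for word, code in _KEYWORD_CODE.items()
--                if word in category_lower}
--     if not matched:
--         return "EQUITY"
--     # each code has a unique priority, so the minimum is order-independent
--     return min(matched, key=_PRIORITY.index)
-- ===== Notes on version B (the rewrite author's own statement) =====
-- stated objective: alternative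
-- what changed: Instead of an ordered if/elif chain with early exit, B does one flat pass over a keyword->code dict collecting the SET of all matched asset-class codes, then selects the highest-priority matched code with min(key=priority index).
import Mathlib
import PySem

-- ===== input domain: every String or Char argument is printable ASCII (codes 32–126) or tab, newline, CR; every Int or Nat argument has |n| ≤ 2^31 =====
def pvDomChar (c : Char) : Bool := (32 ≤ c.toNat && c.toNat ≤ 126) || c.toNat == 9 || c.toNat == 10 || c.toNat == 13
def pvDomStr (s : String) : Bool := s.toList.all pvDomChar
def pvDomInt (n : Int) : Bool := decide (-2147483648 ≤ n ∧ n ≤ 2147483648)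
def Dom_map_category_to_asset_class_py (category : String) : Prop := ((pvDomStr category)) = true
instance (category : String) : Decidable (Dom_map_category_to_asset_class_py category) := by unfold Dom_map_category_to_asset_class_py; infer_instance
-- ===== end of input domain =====

-- B replaces A's ordered early-exit if/elif chain by one flat pass over a keyword->code table
-- collecting the set of ALL matched codes, then taking the matched code of minimal priority index.
-- ===== PORT A =====
def map_category_to_asset_class_py (category : String) : String :=
  let category_lower := PySem.Str.lower category
  if ["equity", "stock", "growth", "value", "blend"].any (fun word => PySem.Str.isIn word category_lower) then
    "EQUITY"
  else if ["bond", "fixed income", "income"].any (fun word => PySem.Str.isIn word category_lower) then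
    "BOND"
  else if ["balanced", "allocation", "mixed"].any (fun word => PySem.Str.isIn word category_lower) then
    "MIXED"
  else if PySem.Str.isIn "money market" category_lower then
    "MM"
  else if ["commodity", "gold", "silver"].any (fun word => PySem.Str.isIn word category_lower) then
    "COMMODITY"
  else if ["real estate", "reit"].any (fun word => PySem.Str.isIn word category_lower) then
    "REIT"
  else
    "EQUITY"

-- ===== PORT B =====
def pvKeywordCode : List (String × String) :=
  [("equity", "EQUITY"),
   ("stock", "EQUITY"),
   ("growth", "EQUITY"),
   ("value", "EQUITY"),
   ("blend", "EQUITY"),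
   ("bond", "BOND"),
   ("fixed income", "BOND"),
   ("income", "BOND"),
   ("balanced", "MIXED"),
   ("allocation", "MIXED"),
   ("mixed", "MIXED"),
   ("money market", "MM"),
   ("commodity", "COMMODITY"),
   ("gold", "COMMODITY"),
   ("silver", "COMMODITY"),
   ("real estate", "REIT"),
   ("reit", "REIT")]

def pvPriority : List String := ["EQUITY", "BOND", "MIXED", "MM", "COMMODITY", "REIT"]

-- _PRIORITY.index; every code in pvKeywordCode is in pvPriority, so Python's .index never raises (the getD default is unreachable)
def pvPriorityIndex (code : String) : Int := (PySem.List.index? pvPriority code).getD 6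

def map_category_to_asset_class_py_alt (category : String) : String :=
  let cl := PySem.Str.lower category
  let matched : PySem.Set String := PySem.Set.ofList ((pvKeywordCode.filter (fun p => PySem.Str.isIn p.1 cl)).map Prod.snd)
  match PySem.List.min? matched pvPriorityIndex with
  | none => "EQUITY"
  | some code => code

-- ===== PRECONDITION & SPEC =====
def Spec_map_category_to_asset_class_py (category : String) (out : String) : Prop := out = map_category_to_asset_class_py_alt category
instance (category : String) (out : String) : Decidable (Spec_map_category_to_asset_class_py category out) := by unfold Spec_map_category_to_asset_class_py; infer_instance

-- ===== CLAIM =====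
def Claim_equal_map_category_to_asset_class_py : Prop := ∀ (category : String), Dom_map_category_to_asset_class_py category → Spec_map_category_to_asset_class_py category (map_category_to_asset_class_py category)

-- ===== LEMMAS AND PROOFS =====
-- membership in B's matched-code list, characterised per asset-class group
theorem mem_matched (cl : String) (x : String) :
    x ∈ ((pvKeywordCode.filter (fun p => PySem.Str.isIn p.1 cl)).map Prod.snd) ↔
    ((PySem.Str.isIn "equity" cl || (PySem.Str.isIn "stock" cl || (PySem.Str.isIn "growth" cl || (PySem.Str.isIn "value" cl || (PySem.Str.isIn "blend" cl))))) = true ∧ x = "EQUITY") ∨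
    ((PySem.Str.isIn "bond" cl || (PySem.Str.isIn "fixed income" cl || (PySem.Str.isIn "income" cl))) = true ∧ x = "BOND") ∨
    ((PySem.Str.isIn "balanced" cl || (PySem.Str.isIn "allocation" cl || (PySem.Str.isIn "mixed" cl))) = true ∧ x = "MIXED") ∨
    (PySem.Str.isIn "money market" cl = true ∧ x = "MM") ∨
    ((PySem.Str.isIn "commodity" cl || (PySem.Str.isIn "gold" cl || (PySem.Str.isIn "silver" cl))) = true ∧ x = "COMMODITY") ∨
    ((PySem.Str.isIn "real estate" cl || (PySem.Str.isIn "reit" cl)) = true ∧ x = "REIT") := by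
  simp only [pvKeywordCode, List.mem_map, List.mem_filter, List.mem_cons, List.not_mem_nil,
    or_false, Bool.or_eq_true]
  constructor
  · rintro ⟨a, ⟨rfl | rfl | rfl | rfl | rfl | rfl | rfl | rfl | rfl | rfl | rfl | rfl | rfl | rfl | rfl | rfl | rfl, hf⟩, hs⟩
    · exact Or.inl ⟨Or.inl hf, hs.symm⟩
    · exact Or.inl ⟨Or.inr (Or.inl hf), hs.symm⟩
    · exact Or.inl ⟨Or.inr (Or.inr (Or.inl hf)), hs.symm⟩
    · exact Or.inl ⟨Or.inr (Or.inr (Or.inr (Or.inl hf))), hs.symm⟩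
    · exact Or.inl ⟨Or.inr (Or.inr (Or.inr (Or.inr (hf)))), hs.symm⟩
    · exact Or.inr (Or.inl ⟨Or.inl hf, hs.symm⟩)
    · exact Or.inr (Or.inl ⟨Or.inr (Or.inl hf), hs.symm⟩)
    · exact Or.inr (Or.inl ⟨Or.inr (Or.inr (hf)), hs.symm⟩)
    · exact Or.inr (Or.inr (Or.inl ⟨Or.inl hf, hs.symm⟩))
    · exact Or.inr (Or.inr (Or.inl ⟨Or.inr (Or.inl hf), hs.symm⟩))
    · exact Or.inr (Or.inr (Or.inl ⟨Or.inr (Or.inr (hf)), hs.symm⟩))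
    · exact Or.inr (Or.inr (Or.inr (Or.inl ⟨hf, hs.symm⟩)))
    · exact Or.inr (Or.inr (Or.inr (Or.inr (Or.inl ⟨Or.inl hf, hs.symm⟩))))
    · exact Or.inr (Or.inr (Or.inr (Or.inr (Or.inl ⟨Or.inr (Or.inl hf), hs.symm⟩))))
    · exact Or.inr (Or.inr (Or.inr (Or.inr (Or.inl ⟨Or.inr (Or.inr (hf)), hs.symm⟩))))
    · exact Or.inr (Or.inr (Or.inr (Or.inr (Or.inr (⟨Or.inl hf, hs.symm⟩)))))
    · exact Or.inr (Or.inr (Or.inr (Or.inr (Or.inr (⟨Or.inr (hf), hs.symm⟩)))))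
  · rintro (⟨h, rfl⟩ | ⟨h, rfl⟩ | ⟨h, rfl⟩ | ⟨h, rfl⟩ | ⟨h, rfl⟩ | ⟨h, rfl⟩) <;>
      (try rcases h with h | h | h | h | h) <;>
      (try rcases h with h | h | h) <;>
      (try rcases h with h | h)
    · exact ⟨("equity", "EQUITY"), ⟨by simp, h⟩, rfl⟩
    · exact ⟨("stock", "EQUITY"), ⟨by simp, h⟩, rfl⟩
    · exact ⟨("growth", "EQUITY"), ⟨by simp, h⟩, rfl⟩
    · exact ⟨("value", "EQUITY"), ⟨by simp, h⟩, rfl⟩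
    · exact ⟨("blend", "EQUITY"), ⟨by simp, h⟩, rfl⟩
    · exact ⟨("bond", "BOND"), ⟨by simp, h⟩, rfl⟩
    · exact ⟨("fixed income", "BOND"), ⟨by simp, h⟩, rfl⟩
    · exact ⟨("income", "BOND"), ⟨by simp, h⟩, rfl⟩
    · exact ⟨("balanced", "MIXED"), ⟨by simp, h⟩, rfl⟩
    · exact ⟨("allocation", "MIXED"), ⟨by simp, h⟩, rfl⟩
    · exact ⟨("mixed", "MIXED"), ⟨by simp, h⟩, rfl⟩
    · exact ⟨("money market", "MM"), ⟨by simp, h⟩, rfl⟩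
    · exact ⟨("commodity", "COMMODITY"), ⟨by simp, h⟩, rfl⟩
    · exact ⟨("gold", "COMMODITY"), ⟨by simp, h⟩, rfl⟩
    · exact ⟨("silver", "COMMODITY"), ⟨by simp, h⟩, rfl⟩
    · exact ⟨("real estate", "REIT"), ⟨by simp, h⟩, rfl⟩
    · exact ⟨("reit", "REIT"), ⟨by simp, h⟩, rfl⟩

-- A's if/elif chain equals B's min-by-priority over the matched set, for any lowercased string
theorem key_lemma (cl : String) :
    (if (PySem.Str.isIn "equity" cl || (PySem.Str.isIn "stock" cl || (PySem.Str.isIn "growth" cl || (PySem.Str.isIn "value" cl || (PySem.Str.isIn "blend" cl))))) then "EQUITY"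
     else if (PySem.Str.isIn "bond" cl || (PySem.Str.isIn "fixed income" cl || (PySem.Str.isIn "income" cl))) then "BOND"
     else if (PySem.Str.isIn "balanced" cl || (PySem.Str.isIn "allocation" cl || (PySem.Str.isIn "mixed" cl))) then "MIXED"
     else if PySem.Str.isIn "money market" cl then "MM"
     else if (PySem.Str.isIn "commodity" cl || (PySem.Str.isIn "gold" cl || (PySem.Str.isIn "silver" cl))) then "COMMODITY"
     else if (PySem.Str.isIn "real estate" cl || (PySem.Str.isIn "reit" cl)) then "REIT"
     else "EQUITY")
    =
    (match (@PySem.List.min? String Int _ _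
        (PySem.Set.ofList ((pvKeywordCode.filter (fun p => PySem.Str.isIn p.1 cl)).map Prod.snd))
        pvPriorityIndex : Option String) with
     | none => "EQUITY"
     | some code => code) := by
  by_cases h1 : (PySem.Str.isIn "equity" cl || (PySem.Str.isIn "stock" cl || (PySem.Str.isIn "growth" cl || (PySem.Str.isIn "value" cl || (PySem.Str.isIn "blend" cl))))) = true
  · rw [if_pos h1]
    have hmem : "EQUITY" ∈ PySem.Set.ofList ((pvKeywordCode.filter (fun p => PySem.Str.isIn p.1 cl)).map Prod.snd) := by
      rw [PySem.Set.mem_ofList, mem_matched]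
      exact Or.inl ⟨h1, rfl⟩
    cases hm : @PySem.List.min? String Int _ _ (PySem.Set.ofList ((pvKeywordCode.filter (fun p => PySem.Str.isIn p.1 cl)).map Prod.snd)) pvPriorityIndex with
    | none =>
      exfalso
      rw [PySem.List.min?_eq_none_iff] at hm
      rw [hm] at hmem
      exact absurd hmem (List.not_mem_nil)
    | some m =>
      have hle := PySem.List.min?_isMin hm _ hmem
      have hd := (mem_matched cl m).1 ((PySem.Set.mem_ofList _ m).1 (PySem.List.min?_mem hm))
      rcases hd with ⟨hb, rfl⟩ | ⟨hb, rfl⟩ | ⟨hb, rfl⟩ | ⟨hb, rfl⟩ | ⟨hb, rfl⟩ | ⟨hb, rfl⟩ <;>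
        first | rfl | (exfalso; revert hle; decide)
  by_cases h2 : (PySem.Str.isIn "bond" cl || (PySem.Str.isIn "fixed income" cl || (PySem.Str.isIn "income" cl))) = true
  · rw [if_neg h1, if_pos h2]
    have hmem : "BOND" ∈ PySem.Set.ofList ((pvKeywordCode.filter (fun p => PySem.Str.isIn p.1 cl)).map Prod.snd) := by
      rw [PySem.Set.mem_ofList, mem_matched]
      exact Or.inr (Or.inl ⟨h2, rfl⟩)
    cases hm : @PySem.List.min? String Int _ _ (PySem.Set.ofList ((pvKeywordCode.filter (fun p => PySem.Str.isIn p.1 cl)).map Prod.snd)) pvPriorityIndex with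
    | none =>
      exfalso
      rw [PySem.List.min?_eq_none_iff] at hm
      rw [hm] at hmem
      exact absurd hmem (List.not_mem_nil)
    | some m =>
      have hle := PySem.List.min?_isMin hm _ hmem
      have hd := (mem_matched cl m).1 ((PySem.Set.mem_ofList _ m).1 (PySem.List.min?_mem hm))
      rcases hd with ⟨hb, rfl⟩ | ⟨hb, rfl⟩ | ⟨hb, rfl⟩ | ⟨hb, rfl⟩ | ⟨hb, rfl⟩ | ⟨hb, rfl⟩ <;>
        first | rfl | (exfalso; revert hle; decide) | (exact absurd hb h1)
  by_cases h3 : (PySem.Str.isIn "balanced" cl || (PySem.Str.isIn "allocation" cl || (PySem.Str.isIn "mixed" cl))) = true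
  · rw [if_neg h1, if_neg h2, if_pos h3]
    have hmem : "MIXED" ∈ PySem.Set.ofList ((pvKeywordCode.filter (fun p => PySem.Str.isIn p.1 cl)).map Prod.snd) := by
      rw [PySem.Set.mem_ofList, mem_matched]
      exact Or.inr (Or.inr (Or.inl ⟨h3, rfl⟩))
    cases hm : @PySem.List.min? String Int _ _ (PySem.Set.ofList ((pvKeywordCode.filter (fun p => PySem.Str.isIn p.1 cl)).map Prod.snd)) pvPriorityIndex with
    | none =>
      exfalso
      rw [PySem.List.min?_eq_none_iff] at hm
      rw [hm] at hmem
      exact absurd hmem (List.not_mem_nil)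
    | some m =>
      have hle := PySem.List.min?_isMin hm _ hmem
      have hd := (mem_matched cl m).1 ((PySem.Set.mem_ofList _ m).1 (PySem.List.min?_mem hm))
      rcases hd with ⟨hb, rfl⟩ | ⟨hb, rfl⟩ | ⟨hb, rfl⟩ | ⟨hb, rfl⟩ | ⟨hb, rfl⟩ | ⟨hb, rfl⟩ <;>
        first | rfl | (exfalso; revert hle; decide) | (exact absurd hb h1) | (exact absurd hb h2)
  by_cases h4 : PySem.Str.isIn "money market" cl = true
  · rw [if_neg h1, if_neg h2, if_neg h3, if_pos h4]
    have hmem : "MM" ∈ PySem.Set.ofList ((pvKeywordCode.filter (fun p => PySem.Str.isIn p.1 cl)).map Prod.snd) := by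
      rw [PySem.Set.mem_ofList, mem_matched]
      exact Or.inr (Or.inr (Or.inr (Or.inl ⟨h4, rfl⟩)))
    cases hm : @PySem.List.min? String Int _ _ (PySem.Set.ofList ((pvKeywordCode.filter (fun p => PySem.Str.isIn p.1 cl)).map Prod.snd)) pvPriorityIndex with
    | none =>
      exfalso
      rw [PySem.List.min?_eq_none_iff] at hm
      rw [hm] at hmem
      exact absurd hmem (List.not_mem_nil)
    | some m =>
      have hle := PySem.List.min?_isMin hm _ hmem
      have hd := (mem_matched cl m).1 ((PySem.Set.mem_ofList _ m).1 (PySem.List.min?_mem hm))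
      rcases hd with ⟨hb, rfl⟩ | ⟨hb, rfl⟩ | ⟨hb, rfl⟩ | ⟨hb, rfl⟩ | ⟨hb, rfl⟩ | ⟨hb, rfl⟩ <;>
        first | rfl | (exfalso; revert hle; decide) | (exact absurd hb h1) | (exact absurd hb h2) | (exact absurd hb h3)
  by_cases h5 : (PySem.Str.isIn "commodity" cl || (PySem.Str.isIn "gold" cl || (PySem.Str.isIn "silver" cl))) = true
  · rw [if_neg h1, if_neg h2, if_neg h3, if_neg h4, if_pos h5]
    have hmem : "COMMODITY" ∈ PySem.Set.ofList ((pvKeywordCode.filter (fun p => PySem.Str.isIn p.1 cl)).map Prod.snd) := by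
      rw [PySem.Set.mem_ofList, mem_matched]
      exact Or.inr (Or.inr (Or.inr (Or.inr (Or.inl ⟨h5, rfl⟩))))
    cases hm : @PySem.List.min? String Int _ _ (PySem.Set.ofList ((pvKeywordCode.filter (fun p => PySem.Str.isIn p.1 cl)).map Prod.snd)) pvPriorityIndex with
    | none =>
      exfalso
      rw [PySem.List.min?_eq_none_iff] at hm
      rw [hm] at hmem
      exact absurd hmem (List.not_mem_nil)
    | some m =>
      have hle := PySem.List.min?_isMin hm _ hmem
      have hd := (mem_matched cl m).1 ((PySem.Set.mem_ofList _ m).1 (PySem.List.min?_mem hm))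
      rcases hd with ⟨hb, rfl⟩ | ⟨hb, rfl⟩ | ⟨hb, rfl⟩ | ⟨hb, rfl⟩ | ⟨hb, rfl⟩ | ⟨hb, rfl⟩ <;>
        first | rfl | (exfalso; revert hle; decide) | (exact absurd hb h1) | (exact absurd hb h2) | (exact absurd hb h3) | (exact absurd hb h4)
  by_cases h6 : (PySem.Str.isIn "real estate" cl || (PySem.Str.isIn "reit" cl)) = true
  · rw [if_neg h1, if_neg h2, if_neg h3, if_neg h4, if_neg h5, if_pos h6]
    have hmem : "REIT" ∈ PySem.Set.ofList ((pvKeywordCode.filter (fun p => PySem.Str.isIn p.1 cl)).map Prod.snd) := by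
      rw [PySem.Set.mem_ofList, mem_matched]
      exact Or.inr (Or.inr (Or.inr (Or.inr (Or.inr (⟨h6, rfl⟩)))))
    cases hm : @PySem.List.min? String Int _ _ (PySem.Set.ofList ((pvKeywordCode.filter (fun p => PySem.Str.isIn p.1 cl)).map Prod.snd)) pvPriorityIndex with
    | none =>
      exfalso
      rw [PySem.List.min?_eq_none_iff] at hm
      rw [hm] at hmem
      exact absurd hmem (List.not_mem_nil)
    | some m =>
      have hle := PySem.List.min?_isMin hm _ hmem
      have hd := (mem_matched cl m).1 ((PySem.Set.mem_ofList _ m).1 (PySem.List.min?_mem hm))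
      rcases hd with ⟨hb, rfl⟩ | ⟨hb, rfl⟩ | ⟨hb, rfl⟩ | ⟨hb, rfl⟩ | ⟨hb, rfl⟩ | ⟨hb, rfl⟩ <;>
        first | rfl | (exact absurd hb h1) | (exact absurd hb h2) | (exact absurd hb h3) | (exact absurd hb h4) | (exact absurd hb h5)
  · rw [if_neg h1, if_neg h2, if_neg h3, if_neg h4, if_neg h5, if_neg h6]
    have hnil : ((pvKeywordCode.filter (fun p => PySem.Str.isIn p.1 cl)).map Prod.snd : List String) = [] := by
      simp only [Bool.or_eq_true, not_or, Bool.not_eq_true] at h1 h2 h3 h4 h5 h6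
      simp_all [pvKeywordCode]
    rw [hnil]
    rfl

-- ===== VERDICT =====
theorem map_category_to_asset_class_py_spec : Claim_equal_map_category_to_asset_class_py := by
  intro category _
  unfold Spec_map_category_to_asset_class_py map_category_to_asset_class_py
    map_category_to_asset_class_py_alt
  simp only [List.any_cons, List.any_nil, Bool.or_false]
  exact key_lemma (PySem.Str.lower category)
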